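-- pv_equiv track=rewrite | github.com/hcvst/pyqr | qrcode.py | encode_AN
-- ===== SOURCE A (Python) =====
-- table_alnum = ['0', '1', '2', '3', '4', '5', '6', '7', '8', '9',
--                'A', 'B', 'C', 'D', 'E', 'F', 'G', 'H', 'I', 'J',
--                'K', 'L', 'M', 'N', 'O', 'P', 'Q', 'R', 'S', 'T',
--                'U', 'V', 'W', 'X', 'Y', 'Z', ' ', '$', '%', '*',
--                '+', '-', '.', '/', ':']
--
-- def encode_AN(s):
--     data = list(s.upper())
--     bits = [0,0,1,0] #4bit
--     l = len(data)
--     bits += bitlist(l, 9) #FIXME 9 not always the case?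
--     oddbit = None if l % 2 == 0 else data.pop()
--     for i in range(0,len(data),2):
--         v = table_alnum.index(data[i])*45
--         v += table_alnum.index(data[i+1])
--         bits += bitlist(v, 11)
--     if oddbit:
--         v = table_alnum.index(oddbit)
--         bits += bitlist(v, 6)
--     bits += [0,0,0,0] #FIXME only add terminator if required?
--     return bit_to_intlist(bits)
--
-- def bitlist(i, l):
--     """
--     Returns a list of length l representing the bit sequence of i.
--     For example: bitlist(2,5) returns [0,0,0,1,0]
--     """
--     b = bin(i)[2:] #cut off initial '0b'
--     d = l - len(b)
--     if d < 0:
--         raise Exception("Integer does not fit into bitlist.")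
--     else:
--         return [int(i) for i in list('0'*d+b)]
--
-- def bit_to_intlist(b):
--     d = len(b) % 8
--     if d: b += [0] * (8 - d) # pad list
--     intlist = []
--     for i in range(0, len(b), 8):
--         v  = b[i] << 7
--         v += b[i+1] << 6
--         v += b[i+2] << 5
--         v += b[i+3] << 4
--         v += b[i+4] << 3
--         v += b[i+5] << 2
--         v += b[i+6] << 1
--         v += b[i+7]
--         intlist.append(v)
--     return intlist
-- ===== SOURCE B (Python) =====
-- table_alnum = ['0', '1', '2', '3', '4', '5', '6', '7', '8', '9',
--                'A', 'B', 'C', 'D', 'E', 'F', 'G', 'H', 'I', 'J',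
--                'K', 'L', 'M', 'N', 'O', 'P', 'Q', 'R', 'S', 'T',
--                'U', 'V', 'W', 'X', 'Y', 'Z', ' ', '$', '%', '*',
--                '+', '-', '.', '/', ':']
--
-- def _pack_pairs(idx, n):
--     # 4-bit mode, 9-bit length, then one 11-bit field per character pair,
--     # all packed into one running integer (value, bit-count)
--     acc, nbits = (0b0010 << 9) | n, 13
--     for i in range(0, n - 1, 2):
--         acc = (acc << 11) | (idx[i] * 45 + idx[i + 1])
--         nbits += 11
--     return acc, nbits
--
-- def _emit(acc, nbits):
--     # pad the stream to a byte boundary and slice bytes off the top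
--     pad = (-nbits) % 8
--     acc <<= pad
--     nbits += pad
--     return [(acc >> (nbits - 8 * (k + 1))) & 0xFF for k in range(nbits // 8)]
--
-- def encode_AN(s):
--     u = s.upper()
--     n = len(u)
--     if n > 511:
--         raise ValueError("length does not fit into 9 bits")
--     idx = [table_alnum.index(c) for c in u]
--     acc, nbits = _pack_pairs(idx, n)
--     if n % 2:
--         acc, nbits = (acc << 6) | idx[-1], nbits + 6
--     return _emit(acc << 4, nbits + 4)    # 4-bit terminator, then bytes
-- ===== Notes on version B (the rewrite author's own statement) =====
-- stated objective: alternative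
-- what changed: B packs all fields into one running integer accumulator (acc, nbits) and slices the bytes off its top at the end, instead of A's intermediate per-bit list and its separate group-of-8 byte re-scan.
import Mathlib
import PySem

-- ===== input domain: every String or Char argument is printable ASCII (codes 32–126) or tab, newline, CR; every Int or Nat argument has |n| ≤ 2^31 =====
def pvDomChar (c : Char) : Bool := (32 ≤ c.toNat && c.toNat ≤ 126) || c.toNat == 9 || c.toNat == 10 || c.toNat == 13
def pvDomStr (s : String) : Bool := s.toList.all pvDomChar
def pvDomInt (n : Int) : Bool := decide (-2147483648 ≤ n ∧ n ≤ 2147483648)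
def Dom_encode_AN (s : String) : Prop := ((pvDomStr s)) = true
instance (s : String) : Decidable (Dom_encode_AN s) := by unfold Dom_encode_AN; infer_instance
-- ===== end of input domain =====

-- B replaces A's intermediate bit list and its group-of-8 re-scan by one running
-- integer accumulator (acc, nbits) from which the bytes are sliced at the end (objective: alternative).

-- ===== PORT A =====
def pvTable : List Char :=
  ['0', '1', '2', '3', '4', '5', '6', '7', '8', '9',
   'A', 'B', 'C', 'D', 'E', 'F', 'G', 'H', 'I', 'J',
   'K', 'L', 'M', 'N', 'O', 'P', 'Q', 'R', 'S', 'T',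
   'U', 'V', 'W', 'X', 'Y', 'Z', ' ', '$', '%', '*',
   '+', '-', '.', '/', ':']

-- bin(n)[2:] as a msb-first digit list (exact for n ≥ 0, the only use here)
def pvPyBin (n : Nat) : List Nat :=
  if n = 0 then [0] else (Nat.digits 2 n).reverse

-- bitlist(i, l); the d < 0 branch is Python's raise (excluded by Pre_), [] there
def pvBitlist (i l : Nat) : List Nat :=
  let b := pvPyBin i
  if l < b.length then [] else List.replicate (l - b.length) 0 ++ b

-- the byte loop of bit_to_intlist (b already padded)
def pvBytesFold (b : List Nat) : List Int :=
  (PySem.List.pyRange 0 (b.length : Int) 8).foldl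
    (fun acc i =>
      let v := PySem.List.pyGetD b i 0 <<< 7 + PySem.List.pyGetD b (i+1) 0 <<< 6
             + PySem.List.pyGetD b (i+2) 0 <<< 5 + PySem.List.pyGetD b (i+3) 0 <<< 4
             + PySem.List.pyGetD b (i+4) 0 <<< 3 + PySem.List.pyGetD b (i+5) 0 <<< 2
             + PySem.List.pyGetD b (i+6) 0 <<< 1 + PySem.List.pyGetD b (i+7) 0
      acc ++ [(v : Int)]) []

def pvBitToIntlist (b : List Nat) : List Int :=
  let d := b.length % 8
  pvBytesFold (if d ≠ 0 then b ++ List.replicate (8 - d) 0 else b)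

def encode_AN (s : String) : List Int :=
  let data := PySem.Chars.upper s.toList          -- list(s.upper())
  let bits : List Nat := [0, 0, 1, 0]
  let l := data.length
  let bits := bits ++ pvBitlist l 9
  let oddbit : Option Char := if l % 2 = 0 then none else data.getLast?   -- data.pop()
  let data := if l % 2 = 0 then data else data.dropLast
  -- table_alnum.index c: getD 0 is the total form, c ∈ table under Pre_ (else Python raises)
  let bits := (PySem.List.pyRange 0 (data.length : Int) 2).foldl
    (fun bs i =>
      let v := (PySem.List.index? pvTable (PySem.List.pyGetD data i '0')).getD 0 * 45
             + (PySem.List.index? pvTable (PySem.List.pyGetD data (i+1) '0')).getD 0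
      bs ++ pvBitlist v 11) bits
  let bits := match oddbit with
    | some c => bits ++ pvBitlist ((PySem.List.index? pvTable c).getD 0) 6
    | none   => bits
  let bits := bits ++ [0, 0, 0, 0]
  pvBitToIntlist bits

-- ===== PORT B =====
-- _pack_pairs(idx, n)
def pvPackPairs (idx : List Nat) (n : Nat) : Nat × Nat :=
  (PySem.List.pyRange 0 ((n : Int) - 1) 2).foldl
    (fun (p : Nat × Nat) i =>
      ((p.1 <<< 11) ||| (PySem.List.pyGetD idx i 0 * 45 + PySem.List.pyGetD idx (i+1) 0),
       p.2 + 11))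
    ((2 <<< 9) ||| n, 13)

-- _emit(acc, nbits)
def pvEmit (acc nbits : Nat) : List Int :=
  let pad := (PySem.Int.mod (-(nbits : Int)) 8).toNat
  let acc := acc <<< pad
  let nbits := nbits + pad
  (List.range (nbits / 8)).map (fun k => (((acc >>> (nbits - 8 * (k + 1))) &&& 255 : Nat) : Int))

def encode_AN_alt (s : String) : List Int :=
  let u := PySem.Chars.upper s.toList
  let n := u.length
  -- (Source B raises ValueError for n > 511; those inputs are outside Pre_encode_AN)
  let idx : List Nat := u.map (fun c => (PySem.List.index? pvTable c).getD 0)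
  let st := pvPackPairs idx n
  let st := if n % 2 = 1 then ((st.1 <<< 6) ||| PySem.List.pyGetD idx (-1) 0, st.2 + 6) else st
  pvEmit (st.1 <<< 4) (st.2 + 4)    -- 4-bit terminator, then bytes

-- ===== PRECONDITION & SPEC =====
-- Pre_ excludes exactly the inputs where A raises: a string longer than 511 after upper()
-- (bitlist(l, 9) raises) or containing a character whose uppercase is not in table_alnum
-- (list.index raises ValueError).
def Pre_encode_AN (s : String) : Prop :=
  (PySem.Chars.upper s.toList).length ≤ 511 ∧
  ((PySem.Chars.upper s.toList).all (fun c => pvTable.contains c)) = true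
instance (s : String) : Decidable (Pre_encode_AN s) := by unfold Pre_encode_AN; infer_instance

def pvWitness_encode_AN : String := "AC-42"

def Spec_encode_AN (s : String) (out : List Int) : Prop := out = encode_AN_alt s
instance (s : String) (out : List Int) : Decidable (Spec_encode_AN s out) := by
  unfold Spec_encode_AN; infer_instance

-- ===== CLAIM (what is proved, stated in full; the proofs are below) =====
def Claim_equal_encode_AN : Prop :=
  ∀ (s : String), Dom_encode_AN s → Pre_encode_AN s → Spec_encode_AN s (encode_AN s)

-- ===== LEMMAS AND PROOFS =====

-- the value of a msb-first bit list
def pvBitsVal (bs : List Nat) : Nat := bs.foldl (fun a b => 2 * a + b) 0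

theorem pvBitsVal_foldl_from (a : Nat) (ys : List Nat) :
    ys.foldl (fun a b => 2 * a + b) a = a * 2 ^ ys.length + pvBitsVal ys := by
  induction ys generalizing a with
  | nil => simp [pvBitsVal]
  | cons b t ih =>
    simp only [List.foldl_cons, List.length_cons]
    rw [ih (2*a+b), show pvBitsVal (b :: t) = (b :: t).foldl (fun a b => 2*a+b) 0 from rfl,
        List.foldl_cons, ih (2*0+b)]
    ring

theorem pvBitsVal_append (xs ys : List Nat) :
    pvBitsVal (xs ++ ys) = pvBitsVal xs * 2 ^ ys.length + pvBitsVal ys := by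
  unfold pvBitsVal
  rw [List.foldl_append, pvBitsVal_foldl_from]
  rfl

theorem pvBitsVal_cons (b : Nat) (t : List Nat) :
    pvBitsVal (b :: t) = b * 2 ^ t.length + pvBitsVal t := by
  have := pvBitsVal_append [b] t
  simpa [pvBitsVal] using this

theorem pvBitsVal_lt (bs : List Nat) (h : ∀ b ∈ bs, b < 2) : pvBitsVal bs < 2 ^ bs.length := by
  induction bs with
  | nil => simp [pvBitsVal]
  | cons b t ih =>
    rw [pvBitsVal_cons]
    have hb : b < 2 := h b (by simp)
    have ht := ih (fun x hx => h x (by simp [hx]))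
    simp only [List.length_cons, pow_succ]
    nlinarith

theorem pvBitsVal_replicate (p : Nat) : pvBitsVal (List.replicate p 0) = 0 := by
  induction p with
  | zero => rfl
  | succ n ih => rw [List.replicate_succ, pvBitsVal_cons, ih]; ring

theorem pvBitsVal_reverse (l : List Nat) : pvBitsVal l.reverse = Nat.ofDigits 2 l := by
  induction l with
  | nil => rfl
  | cons d t ih =>
    rw [List.reverse_cons, pvBitsVal_append, ih, Nat.ofDigits_cons]
    simp [pvBitsVal]
    ring

theorem pvPyBin_val (n : Nat) : pvBitsVal (pvPyBin n) = n := by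
  unfold pvPyBin
  split
  · simp_all [pvBitsVal]
  · rw [pvBitsVal_reverse, Nat.ofDigits_digits]

theorem pvPyBin_lt (n : Nat) : ∀ b ∈ pvPyBin n, b < 2 := by
  unfold pvPyBin
  split
  · simp
  · intro b hb
    exact Nat.digits_lt_base (by norm_num) (List.mem_reverse.mp hb)

theorem pvPyBin_len_le (n l : Nat) (h : n < 2 ^ l) (hl : 1 ≤ l) : (pvPyBin n).length ≤ l := by
  unfold pvPyBin
  split
  · simpa
  · rw [List.length_reverse, Nat.length_digits 2 n (by norm_num) (by assumption)]
    have := Nat.log_lt_of_lt_pow (by assumption) h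
    omega

theorem pvBitlist_spec (i l : Nat) (hi : i < 2 ^ l) (hl : 1 ≤ l) :
    (pvBitlist i l).length = l ∧ pvBitsVal (pvBitlist i l) = i ∧ ∀ b ∈ pvBitlist i l, b < 2 := by
  have hle := pvPyBin_len_le i l hi hl
  unfold pvBitlist
  simp only [if_neg (by omega : ¬ l < (pvPyBin i).length)]
  refine ⟨by simp; omega, ?_, ?_⟩
  · rw [pvBitsVal_append, pvBitsVal_replicate, pvPyBin_val]; ring
  · intro b hb
    rcases List.mem_append.mp hb with h|h
    · simp_all [List.eq_of_mem_replicate h]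
    · exact pvPyBin_lt i b h

theorem pvDivLem (a r e : Nat) (h : r < 2^e) : (a * 2^e + r) / 2^e = a := by
  rw [Nat.add_div_of_dvd_right ⟨a, by ring⟩, Nat.div_eq_of_lt h,
      Nat.mul_div_cancel _ (Nat.two_pow_pos e), Nat.add_zero]

theorem pvBitsVal_div (bs : List Nat) (k : Nat) (h2 : ∀ b ∈ bs, b < 2) (hk : k ≤ bs.length) :
    pvBitsVal bs / 2 ^ (bs.length - k) = pvBitsVal (bs.take k) := by
  have hdl : (bs.drop k).length = bs.length - k := by simp
  have hlt : pvBitsVal (bs.drop k) < 2 ^ (bs.length - k) := by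
    rw [← hdl]; exact pvBitsVal_lt _ (fun b hb => h2 b (List.mem_of_mem_drop hb))
  conv_lhs => rw [← List.take_append_drop k bs, pvBitsVal_append, hdl,
                  List.length_append, List.length_take, List.length_drop]
  rw [show min k bs.length + (bs.length - k) - k = bs.length - k by omega,
      pvDivLem _ _ _ hlt]

theorem pvBitsVal_mod (bs : List Nat) (h2 : ∀ b ∈ bs, b < 2) (hk : 8 ≤ bs.length) :
    pvBitsVal bs % 256 = pvBitsVal (bs.drop (bs.length - 8)) := by
  have hdl : (bs.drop (bs.length - 8)).length = 8 := by simp; omega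
  have hlt : pvBitsVal (bs.drop (bs.length - 8)) < 256 := by
    have := pvBitsVal_lt (bs.drop (bs.length - 8))
      (fun b hb => h2 b (List.mem_of_mem_drop hb))
    rw [hdl] at this; norm_num at this; omega
  conv_lhs => rw [← List.take_append_drop (bs.length - 8) bs, pvBitsVal_append, hdl]
  rw [show (2:Nat) ^ 8 = 256 by norm_num]
  simp [Nat.mod_eq_of_lt hlt]

theorem pvGetD_window (P : List Nat) (n t : Nat) (_h : n + t < P.length) (ht : t < 8) :
    P.getD (n + t) 0 = ((P.drop n).take 8).getD t 0 := by
  rw [List.getD_eq_getElem?_getD, List.getD_eq_getElem?_getD]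
  simp [ht, List.getElem?_drop]

theorem pvByteAt (P : List Nat) (m j : Nat) (h2 : ∀ b ∈ P, b < 2) (hlen : P.length = 8 * m)
    (hj : j < m) :
    P.getD (8*j) 0 <<< 7 + P.getD (8*j+1) 0 <<< 6 + P.getD (8*j+2) 0 <<< 5
      + P.getD (8*j+3) 0 <<< 4 + P.getD (8*j+4) 0 <<< 3 + P.getD (8*j+5) 0 <<< 2
      + P.getD (8*j+6) 0 <<< 1 + P.getD (8*j+7) 0
    = pvBitsVal P / 2 ^ (8 * (m - 1 - j)) % 256 := by
  have hdivexp : 8 * (m - 1 - j) = P.length - (8*j+8) := by omega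
  rw [hdivexp, pvBitsVal_div P (8*j+8) h2 (by omega)]
  have hTlen : (P.take (8*j+8)).length = 8*j+8 := by simp; omega
  have hT2 : ∀ b ∈ P.take (8*j+8), b < 2 := fun b hb => h2 b (List.mem_of_mem_take hb)
  rw [pvBitsVal_mod _ hT2 (by omega), hTlen, show 8*j+8-8 = 8*j by omega, List.drop_take,
      show 8*j+8-8*j = 8 by omega]
  have hG : ∀ t, t < 8 → P.getD (8*j+t) 0 = ((P.drop (8*j)).take 8).getD t 0 :=
    fun t ht => pvGetD_window P (8*j) t (by omega) ht
  have h0 := hG 0 (by omega); rw [Nat.add_zero] at h0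
  rw [h0, hG 1 (by omega), hG 2 (by omega), hG 3 (by omega), hG 4 (by omega),
      hG 5 (by omega), hG 6 (by omega), hG 7 (by omega)]
  have hWlen : ((P.drop (8*j)).take 8).length = 8 := by simp; omega
  rcases hw : (P.drop (8*j)).take 8 with _|⟨b0,_|⟨b1,_|⟨b2,_|⟨b3,_|⟨b4,_|⟨b5,_|⟨b6,_|⟨b7,rest⟩⟩⟩⟩⟩⟩⟩⟩ <;>
    rw [hw] at hWlen <;> simp at hWlen
  subst hWlen
  simp [pvBitsVal, List.foldl, List.getD, Nat.shiftLeft_eq]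
  ring

theorem pvBytesFold_eq (P : List Nat) (m : Nat) (hlen : P.length = 8 * m)
    (h2 : ∀ b ∈ P, b < 2) :
    pvBytesFold P
      = (List.range m).map (fun k => ((pvBitsVal P / 2 ^ (8 * (m - 1 - k)) % 256 : Nat) : Int)) := by
  unfold pvBytesFold
  rw [hlen, PySem.List.pyRange_of_pos 0 (8*m : Nat) (by norm_num : (0:Int) < 8)]
  have hcount : (if (0:Int) < ((8*m : Nat) : Int)
      then ((((8*m : Nat) : Int) - 0 + 8 - 1) / 8).toNat else 0) = m := by
    rcases Nat.eq_zero_or_pos m with rfl | hm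
    · norm_num
    · rw [if_pos (by push_cast; omega)]
      push_cast
      rw [show (8*(m:Int) - 0 + 8 - 1) = 7 + m*8 by ring,
          Int.add_mul_ediv_right 7 (m:Int) (by norm_num), show (7:Int)/8 = 0 by decide]
      simp
  rw [hcount, List.foldl_map, PySem.List.foldl_append_singleton_eq_map, List.nil_append]
  refine List.map_congr_left (fun k hk => ?_)
  have hkm := List.mem_range.mp hk
  simp only [zero_add]
  have e1 : 8*(k:Int) + 1 = ((8*k+1 : Nat) : Int) := by push_cast; ring
  have e2 : 8*(k:Int) + 2 = ((8*k+2 : Nat) : Int) := by push_cast; ring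
  have e3 : 8*(k:Int) + 3 = ((8*k+3 : Nat) : Int) := by push_cast; ring
  have e4 : 8*(k:Int) + 4 = ((8*k+4 : Nat) : Int) := by push_cast; ring
  have e5 : 8*(k:Int) + 5 = ((8*k+5 : Nat) : Int) := by push_cast; ring
  have e6 : 8*(k:Int) + 6 = ((8*k+6 : Nat) : Int) := by push_cast; ring
  have e7 : 8*(k:Int) + 7 = ((8*k+7 : Nat) : Int) := by push_cast; ring
  have e0 : 8*(k:Int) = ((8*k : Nat) : Int) := by push_cast; ring
  rw [e1, e2, e3, e4, e5, e6, e7, e0]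
  simp only [PySem.List.pyGetD_natCast]
  have := pvByteAt P m k h2 hlen hkm
  exact_mod_cast this

theorem pvIdx_lt (xs : List Char) (c : Char) (hne : xs ≠ []) :
    (PySem.List.index? xs c).getD 0 < xs.length := by
  show (List.idxOf? c xs).getD 0 < xs.length
  cases h : List.idxOf? c xs with
  | none => simpa using List.length_pos_of_ne_nil hne
  | some i =>
    obtain ⟨hi, -⟩ := List.idxOf?_eq_some_iff.mp h
    simpa using hi

theorem pvPack_eq {α : Type} (l : List α) (F f : α → Nat) (w : Nat) (a0 c0 : Nat)
    (hEq : ∀ x ∈ l, F x = f x) (hf : ∀ x ∈ l, f x < 2 ^ w) :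
    l.foldl (fun (p : Nat × Nat) i => ((p.1 <<< w) ||| F i, p.2 + w)) (a0, c0)
      = (l.foldl (fun a i => a * 2 ^ w + f i) a0, c0 + w * l.length) := by
  induction l generalizing a0 c0 with
  | nil => simp
  | cons x t ih =>
    simp only [List.foldl_cons, List.length_cons]
    rw [hEq x List.mem_cons_self,
        ih _ _ (fun y hy => hEq y (List.mem_cons_of_mem _ hy))
               (fun y hy => hf y (List.mem_cons_of_mem _ hy)),
        ← Nat.shiftLeft_add_eq_or_of_lt (hf x List.mem_cons_self) a0, Nat.shiftLeft_eq,
        Prod.mk.injEq]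
    exact ⟨rfl, by ring⟩

theorem pvFlatLen {α : Type} (l : List α) (g : α → List Nat) (w : Nat)
    (hg : ∀ x ∈ l, (g x).length = w) :
    (l.flatMap g).length = w * l.length := by
  induction l with
  | nil => simp
  | cons x t ih =>
    rw [List.flatMap_cons, List.length_append, hg x (List.mem_cons_self),
        ih (fun y hy => hg y (List.mem_cons_of_mem _ hy)), List.length_cons]
    ring

theorem pvFlatVal {α : Type} (l : List α) (g : α → List Nat) (f : α → Nat) (w : Nat)
    (bs0 : List Nat) (hg : ∀ x ∈ l, (g x).length = w ∧ pvBitsVal (g x) = f x) :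
    pvBitsVal (bs0 ++ l.flatMap g) = l.foldl (fun a i => a * 2 ^ w + f i) (pvBitsVal bs0) := by
  induction l generalizing bs0 with
  | nil => simp
  | cons x t ih =>
    rw [List.flatMap_cons, ← List.append_assoc, List.foldl_cons,
        ih (bs0 ++ g x) (fun y hy => hg y (List.mem_cons_of_mem _ hy)),
        pvBitsVal_append, (hg x (List.mem_cons_self)).1, (hg x (List.mem_cons_self)).2]

-- canonical descriptions of the two programs' shared data
def pvIdxOf (c : Char) : Nat := (PySem.List.index? pvTable c).getD 0

def pvFN (u : List Char) (k : Nat) : Nat :=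
  pvIdxOf (u.getD (2*k) '0') * 45 + pvIdxOf (u.getD (2*k+1) '0')

def pvBitsA (u : List Char) : List Nat :=
  ([0,0,1,0] ++ pvBitlist u.length 9)
    ++ (List.range (u.length/2)).flatMap (fun k => pvBitlist (pvFN u k) 11)

theorem pvIdxOf_lt (c : Char) : pvIdxOf c < 45 :=
  pvIdx_lt pvTable c (by decide)

theorem pvFN_lt (u : List Char) (k : Nat) : pvFN u k < 2 ^ 11 := by
  have h1 := pvIdxOf_lt (u.getD (2*k) '0')
  have h2 := pvIdxOf_lt (u.getD (2*k+1) '0')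
  have : (2:Nat) ^ 11 = 2048 := by norm_num
  unfold pvFN
  omega

theorem pvRange2 (N : Nat) :
    PySem.List.pyRange 0 (N : Int) 2
      = (List.range ((N+1)/2)).map (fun (k : Nat) => (0:Int) + 2*(k:Int)) := by
  rw [PySem.List.pyRange_of_pos _ _ (by norm_num : (0:Int) < 2)]
  have hc : (if (0:Int) < (N:Int) then (((N:Int) - 0 + 2 - 1)/2).toNat else 0) = (N+1)/2 := by
    split <;> omega
  rw [hc]

theorem pvRange2' (N : Nat) :
    PySem.List.pyRange 0 ((N : Int) - 1) 2
      = (List.range (N/2)).map (fun (k : Nat) => (0:Int) + 2*(k:Int)) := by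
  rw [PySem.List.pyRange_of_pos _ _ (by norm_num : (0:Int) < 2)]
  have hc : (if (0:Int) < (N:Int) - 1 then (((N:Int) - 1 - 0 + 2 - 1)/2).toNat else 0) = N/2 := by
    split <;> omega
  rw [hc]

theorem pvGetD_take (l : List Char) (N i : Nat) (d : Char) (h : i < N) :
    (l.take N).getD i d = l.getD i d := by
  rw [List.getD_eq_getElem?_getD, List.getD_eq_getElem?_getD, List.getElem?_take, if_pos h]

theorem pvGetD_idx (u : List Char) (i : Int) :
    PySem.List.pyGetD (u.map (fun c => (PySem.List.index? pvTable c).getD 0)) i 0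
      = pvIdxOf (PySem.List.pyGetD u i '0') := by
  have h := PySem.List.pyGetD_map (fun c => (PySem.List.index? pvTable c).getD 0) u i '0'
  simp only at h
  rw [show (PySem.List.index? pvTable '0').getD 0 = 0 from by decide] at h
  exact h

theorem pvAFold (u data : List Char) (hd : data = u.take (2*(u.length/2))) :
    (PySem.List.pyRange 0 ((data.length : Nat) : Int) 2).foldl
      (fun bs i => bs ++ pvBitlist
        ((PySem.List.index? pvTable (PySem.List.pyGetD data i '0')).getD 0 * 45 +
         (PySem.List.index? pvTable (PySem.List.pyGetD data (i+1) '0')).getD 0) 11)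
      ([0,0,1,0] ++ pvBitlist u.length 9)
    = pvBitsA u := by
  subst hd
  have hdl : (u.take (2*(u.length/2))).length = 2*(u.length/2) := by
    simp; omega
  rw [hdl, pvRange2 (2*(u.length/2)), show (2*(u.length/2)+1)/2 = u.length/2 by omega]
  rw [List.foldl_map]
  rw [PySem.List.foldl_append_eq_flatMap]
  unfold pvBitsA
  refine congrArg (fun t => ([0,0,1,0] ++ pvBitlist u.length 9) ++ t) ?_
  refine List.flatMap_congr (fun k hk => ?_)
  have hkm := List.mem_range.mp hk
  have e0 : (0:Int) + 2*(k:Int) = ((2*k : Nat) : Int) := by push_cast; ring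
  have e1 : (0:Int) + 2*(k:Int) + 1 = ((2*k+1 : Nat) : Int) := by push_cast; ring
  rw [e1, e0, PySem.List.pyGetD_natCast, PySem.List.pyGetD_natCast,
      pvGetD_take u (2*(u.length/2)) (2*k) '0' (by omega),
      pvGetD_take u (2*(u.length/2)) (2*k+1) '0' (by omega)]
  rfl

theorem pvBitsA_val (u : List Char) (h511 : u.length ≤ 511) :
    pvBitsVal (pvBitsA u)
      = (List.range (u.length/2)).foldl (fun a k => a * 2 ^ 11 + pvFN u k) (1024 + u.length) := by
  have hn9 : u.length < 2 ^ 9 := by omega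
  have hbl9 := pvBitlist_spec u.length 9 hn9 (by norm_num)
  unfold pvBitsA
  rw [pvFlatVal (List.range (u.length/2)) _ (pvFN u) 11 _
      (fun k _ => ⟨(pvBitlist_spec (pvFN u k) 11 (pvFN_lt u k) (by norm_num)).1,
                   (pvBitlist_spec (pvFN u k) 11 (pvFN_lt u k) (by norm_num)).2.1⟩),
      pvBitsVal_append, hbl9.1, hbl9.2.1]
  norm_num [pvBitsVal]

theorem pvBitsA_len (u : List Char) (h511 : u.length ≤ 511) :
    (pvBitsA u).length = 13 + 11 * (u.length/2) := by
  have hn9 : u.length < 2 ^ 9 := by omega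
  have hbl9 := pvBitlist_spec u.length 9 hn9 (by norm_num)
  unfold pvBitsA
  rw [List.length_append, List.length_append, hbl9.1,
      pvFlatLen (List.range (u.length/2)) _ 11
        (fun k _ => (pvBitlist_spec (pvFN u k) 11 (pvFN_lt u k) (by norm_num)).1),
      List.length_range]
  norm_num

theorem pvBitsA_bits (u : List Char) (h511 : u.length ≤ 511) :
    ∀ b ∈ pvBitsA u, b < 2 := by
  have hn9 : u.length < 2 ^ 9 := by omega
  intro b hb
  unfold pvBitsA at hb
  rcases List.mem_append.mp hb with h | h
  · rcases List.mem_append.mp h with h' | h'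
    · simp at h'; omega
    · exact (pvBitlist_spec u.length 9 hn9 (by norm_num)).2.2 b h'
  · obtain ⟨k, -, hk⟩ := List.mem_flatMap.mp h
    exact (pvBitlist_spec (pvFN u k) 11 (pvFN_lt u k) (by norm_num)).2.2 b hk

theorem pvPackPairs_eq (u : List Char) (h511 : u.length ≤ 511) :
    pvPackPairs (u.map (fun c => (PySem.List.index? pvTable c).getD 0)) u.length
      = (pvBitsVal (pvBitsA u), (pvBitsA u).length) := by
  have hn9 : u.length < 2 ^ 9 := by omega
  unfold pvPackPairs
  rw [pvRange2' u.length]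
  rw [List.foldl_map]
  refine Eq.trans (pvPack_eq (List.range (u.length/2)) _ (pvFN u) 11 _ 13 ?_
      (fun k _ => pvFN_lt u k)) ?_
  · intro k hk
    have e0 : (0:Int) + 2*(k:Int) = ((2*k : Nat) : Int) := by push_cast; ring
    have e1 : (0:Int) + 2*(k:Int) + 1 = ((2*k+1 : Nat) : Int) := by push_cast; ring
    rw [pvGetD_idx, pvGetD_idx, e1, e0, PySem.List.pyGetD_natCast, PySem.List.pyGetD_natCast]
    rfl
  · rw [pvBitsA_val u h511, pvBitsA_len u h511, List.length_range,
        show (2 <<< 9) ||| u.length = 1024 + u.length by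
          rw [← Nat.shiftLeft_add_eq_or_of_lt hn9 2, Nat.shiftLeft_eq]]


theorem pvEmit_eq (bs : List Nat) (hb : ∀ b ∈ bs, b < 2) :
    pvEmit (pvBitsVal bs) bs.length = pvBitToIntlist bs := by
  unfold pvEmit pvBitToIntlist
  dsimp only
  have hpad : (PySem.Int.mod (-(bs.length : Int)) 8).toNat = (8 - bs.length % 8) % 8 := by
    rw [PySem.Int.mod_eq_emod_of_pos (by norm_num)]; omega
  rw [hpad]
  set L := bs.length with hL
  set p := (8 - L % 8) % 8 with hp
  have hP2 : ∀ b ∈ bs ++ List.replicate p 0, b < 2 := by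
    intro b hbm
    rcases List.mem_append.mp hbm with h | h
    · exact hb b h
    · simp [List.eq_of_mem_replicate h]
  have hMlen : (bs ++ List.replicate p 0).length = 8 * ((L + p) / 8) := by
    simp only [List.length_append, List.length_replicate, ← hL]
    omega
  have hjoin : (if L % 8 ≠ 0 then bs ++ List.replicate (8 - L % 8) 0 else bs)
      = bs ++ List.replicate p 0 := by
    split_ifs with h
    · rw [show p = 8 - L % 8 by omega]
    · rw [show p = 0 by omega]
      simp
  rw [hjoin, pvBytesFold_eq _ ((L + p) / 8) hMlen hP2]
  have hV : pvBitsVal (bs ++ List.replicate p 0) = pvBitsVal bs * 2 ^ p := by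
    rw [pvBitsVal_append, pvBitsVal_replicate, List.length_replicate]
    omega
  rw [hV]
  refine List.map_congr_left (fun k hk => ?_)
  have hkM := List.mem_range.mp hk
  have hdv : 8 ∣ (L + p) := by omega
  congr 1
  rw [Nat.shiftLeft_eq, Nat.shiftRight_eq_div_pow,
      show (255 : Nat) = 2 ^ 8 - 1 by norm_num, Nat.and_two_pow_sub_one_eq_mod,
      show L + p - 8 * (k + 1) = 8 * ((L + p) / 8 - 1 - k) by omega,
      show (2 : Nat) ^ 8 = 256 by norm_num]

theorem pvMain (s : String) (h511 : (PySem.Chars.upper s.toList).length ≤ 511) :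
    encode_AN s = encode_AN_alt s := by
  unfold encode_AN encode_AN_alt
  dsimp only
  set u := PySem.Chars.upper s.toList with hu
  rcases Nat.mod_two_eq_zero_or_one u.length with hpar | hpar
  · -- even length
    rw [if_pos hpar, if_pos hpar, if_neg (by omega : ¬ u.length % 2 = 1)]
    rw [pvAFold u u (by rw [show 2*(u.length/2) = u.length by omega, List.take_length])]
    rw [pvPackPairs_eq u h511]
    have hbits : ∀ b ∈ pvBitsA u ++ [0,0,0,0], b < 2 := by
      intro b hbm
      rcases List.mem_append.mp hbm with h | h
      · exact pvBitsA_bits u h511 b h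
      · simp at h; omega
    have hV : pvBitsVal (pvBitsA u) <<< 4 = pvBitsVal (pvBitsA u ++ [0,0,0,0]) := by
      rw [pvBitsVal_append, Nat.shiftLeft_eq]
      norm_num [show pvBitsVal [0,0,0,0] = 0 from rfl]
    have hLn : (pvBitsA u).length + 4 = (pvBitsA u ++ [0,0,0,0]).length := by simp
    dsimp only
    rw [hV, hLn, pvEmit_eq _ hbits]
  · -- odd length
    have hne : u ≠ [] := by
      intro h
      rw [h] at hpar
      simp at hpar
    rw [if_neg (by omega : ¬ u.length % 2 = 0), if_neg (by omega : ¬ u.length % 2 = 0),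
        if_pos hpar, List.getLast?_eq_some_getLast (h := hne)]
    dsimp only
    rw [pvAFold u u.dropLast
        (by rw [List.dropLast_eq_take, show u.length - 1 = 2*(u.length/2) by omega])]
    rw [pvPackPairs_eq u h511]
    dsimp only
    rw [pvGetD_idx, PySem.List.pyGetD_neg_one u '0' hne,
        show pvIdxOf (u.getLast hne) = (PySem.List.index? pvTable (u.getLast hne)).getD 0
          from rfl]
    set q := (PySem.List.index? pvTable (u.getLast hne)).getD 0 with hq
    have hq6 : q < 2 ^ 6 := lt_trans (pvIdx_lt pvTable _ (by decide)) (by decide)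
    have hb6 := pvBitlist_spec q 6 hq6 (by norm_num)
    have hbits : ∀ b ∈ (pvBitsA u ++ pvBitlist q 6) ++ [0,0,0,0], b < 2 := by
      intro b hbm
      rcases List.mem_append.mp hbm with h | h
      · rcases List.mem_append.mp h with h' | h'
        · exact pvBitsA_bits u h511 b h'
        · exact hb6.2.2 b h'
      · simp at h; omega
    have hV6 : pvBitsVal (pvBitsA u) <<< 6 ||| q
        = pvBitsVal (pvBitsA u ++ pvBitlist q 6) := by
      rw [← Nat.shiftLeft_add_eq_or_of_lt hq6, pvBitsVal_append, hb6.1, hb6.2.1,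
          Nat.shiftLeft_eq]
    have hV4 : pvBitsVal (pvBitsA u ++ pvBitlist q 6) <<< 4
        = pvBitsVal ((pvBitsA u ++ pvBitlist q 6) ++ [0,0,0,0]) := by
      rw [Nat.shiftLeft_eq]
      conv_rhs => rw [pvBitsVal_append]
      norm_num [show pvBitsVal [0,0,0,0] = 0 from rfl]
    have hL6 : (pvBitsA u).length + 6 = (pvBitsA u ++ pvBitlist q 6).length := by
      simp [hb6.1]
    have hL4 : (pvBitsA u ++ pvBitlist q 6).length + 4
        = ((pvBitsA u ++ pvBitlist q 6) ++ [0,0,0,0]).length := by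
      simp only [List.length_append, List.length_cons, List.length_nil]
    rw [hV6, hV4, hL6, hL4, pvEmit_eq _ hbits]

-- ===== VERDICT (by name: the statement is the Claim_ definition above) =====
theorem encode_AN_spec : Claim_equal_encode_AN := by
  intro s _ hpre
  show encode_AN s = encode_AN_alt s
  exact pvMain s hpre.1
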